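-- pv_equiv track=rewrite | github.com/fractal-analytics-platform/fractal-server | tests/v2/fractal_tasks_mock/src/fractal_tasks_mock/utils.py | _group_zarr_urls_by_well
-- ===== SOURCE A (Python) =====
-- def _extract_common_root(zarr_urls: list[str]) -> dict[str, str]:
--     shared_plates = []
--     shared_root_dirs = []
--     for zarr_url in zarr_urls:
--         tmp = zarr_url.split(".zarr/")[0]
--         shared_root_dirs.append("/".join(tmp.split("/")[:-1]))
--         shared_plates.append(tmp.split("/")[-1] + ".zarr")
--
--     if len(set(shared_plates)) > 1 or len(set(shared_root_dirs)) > 1: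
--         raise ValueError
--     shared_plate = list(shared_plates)[0]
--     shared_root_dir = list(shared_root_dirs)[0]
--
--     return dict(shared_root_dir=shared_root_dir, shared_plate=shared_plate)
--
-- def _group_zarr_urls_by_well(zarr_urls: list[str]) -> dict[str, list[str]]:
--     """
--     Given a list of paths, apply custom logic to group them by well.
--     """
--     shared_plate = _extract_common_root(zarr_urls).get("shared_plate")
--     shared_root_dir = _extract_common_root(zarr_urls).get("shared_root_dir")
--     well_to_zarr_urls = {}
--     for zarr_url in zarr_urls:
--         # Extract well ID
--         relative_path = zarr_url.replace(
--             f"{shared_root_dir}/{shared_plate}", ""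
--         ).lstrip("/")
--         path_parts = relative_path.split("/")
--         well = "/".join(path_parts[0:2])
--         # Append to the existing list (or create a new one)
--         if well in well_to_zarr_urls.keys():
--             well_to_zarr_urls[well].append(zarr_url)
--         else:
--             well_to_zarr_urls[well] = [zarr_url]
--     return well_to_zarr_urls
-- ===== SOURCE B (Python) =====
-- def _group_zarr_urls_by_well(zarr_urls: list[str]) -> dict[str, list[str]]:
--     """
--     Group zarr URLs by well, validating the common root by comparing every
--     URL's (root, plate) pair to the first URL's pair (instead of collecting
--     all and counting distinct values), then grouping in two phases: wells in
--     first-appearance order, then one filtering scan per well.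
--     """
--
--     def root_plate(zarr_url: str) -> tuple[str, str]:
--         tmp = zarr_url.split(".zarr/")[0]
--         parts = tmp.split("/")
--         return "/".join(parts[:-1]), parts[-1] + ".zarr"
--
--     root0, plate0 = root_plate(zarr_urls[0])
--     if any(root_plate(u) != (root0, plate0) for u in zarr_urls[1:]):
--         raise ValueError
--
--     def well_of(zarr_url: str) -> str:
--         rel = zarr_url.replace(f"{root0}/{plate0}", "").lstrip("/")
--         return "/".join(rel.split("/")[0:2])
--
--     wells_order: list[str] = []
--     for u in zarr_urls:
--         w = well_of(u)
--         if w not in wells_order: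
--             wells_order.append(w)
--     return {w: [u for u in zarr_urls if well_of(u) == w] for w in wells_order}
-- ===== Notes on version B (the rewrite author's own statement) =====
-- stated objective: alternative
-- what changed: Replaces the set-cardinality validation (collect all plates/roots, count distinct) by a compare-to-first check, and replaces A's single dict-accumulating pass by two-phase grouping: one pass collecting wells in first-appearance order, then one filtering scan over zarr_urls per well.
import Mathlib
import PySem

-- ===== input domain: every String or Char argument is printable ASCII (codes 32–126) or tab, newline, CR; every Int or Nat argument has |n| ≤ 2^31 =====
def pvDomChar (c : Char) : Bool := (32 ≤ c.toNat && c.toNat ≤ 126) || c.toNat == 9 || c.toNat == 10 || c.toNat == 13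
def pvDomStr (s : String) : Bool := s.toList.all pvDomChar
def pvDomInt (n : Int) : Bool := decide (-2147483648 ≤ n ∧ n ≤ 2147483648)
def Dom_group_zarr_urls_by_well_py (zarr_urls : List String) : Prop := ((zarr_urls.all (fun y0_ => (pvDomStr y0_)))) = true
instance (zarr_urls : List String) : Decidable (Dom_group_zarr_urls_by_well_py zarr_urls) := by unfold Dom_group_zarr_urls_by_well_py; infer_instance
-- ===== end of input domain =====

-- B validates the shared root by comparing each url's (root, plate) pair to the first
-- url's pair (instead of counting distinct values with set()), and groups in two phases
-- (wells in first-appearance order, then one filtering scan per well) instead of A's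
-- single dict-accumulating pass; objective: alternative.

-- ===== PORT A =====
-- tmp = zarr_url.split(".zarr/")[0]   (sep nonempty → split? is some; result nonempty → [0] total)
def pvTmp (u : String) : List Char :=
  (((PySem.Chars.split? u.toList ".zarr/".toList).getD []).headD [])

-- "/".join(tmp.split("/")[:-1])
def pvRootOf (u : String) : String :=
  String.ofList (PySem.Chars.join ['/'] (PySem.List.slice (PySem.Chars.splitOn (pvTmp u) ['/']) none (some (-1))))

-- tmp.split("/")[-1] + ".zarr"   (split result is nonempty → [-1] total)
def pvPlateOf (u : String) : String :=
  String.ofList (((PySem.List.pyGet? (PySem.Chars.splitOn (pvTmp u) ['/']) (-1)).getD []) ++ ".zarr".toList)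

-- well = "/".join(zarr_url.replace(f"{root}/{plate}", "").lstrip("/").split("/")[0:2])
-- .lstrip("/") strips the single character '/' from the left: ported by hand as
-- dropWhile (· == '/'), exact for this one-character strip set.
def pvWellOf (root plate u : String) : String :=
  let rel := (PySem.Chars.replace u.toList (root.toList ++ '/' :: plate.toList) []).dropWhile (· == '/')
  String.ofList (PySem.Chars.join ['/'] (PySem.List.slice (PySem.Chars.splitOn rel ['/']) (some 0) (some 2)))

-- _extract_common_root: none = the Python raises (ValueError on >1 distinct, IndexError on [])
def pvExtractCommonRoot (zarr_urls : List String) : Option (PySem.Dict String String) :=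
  let pr := zarr_urls.foldl
    (fun (acc : List String × List String) u => (acc.1 ++ [pvPlateOf u], acc.2 ++ [pvRootOf u]))
    ([], [])
  if PySem.Set.len (PySem.Set.ofList pr.1) > 1 || PySem.Set.len (PySem.Set.ofList pr.2) > 1 then
    none
  else
    match PySem.List.pyGet? pr.1 0, PySem.List.pyGet? pr.2 0 with
    | some plate, some root =>
        some (((PySem.Dict.empty).insert "shared_root_dir" root).insert "shared_plate" plate)
    | _, _ => none

def group_zarr_urls_by_well_py (zarr_urls : List String) : List (String × List String) :=
  -- A calls _extract_common_root twice, reading one key from each result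
  match pvExtractCommonRoot zarr_urls, pvExtractCommonRoot zarr_urls with
  | some d1, some d2 =>
    let shared_plate := (d1.get? "shared_plate").getD ""
    let shared_root_dir := (d2.get? "shared_root_dir").getD ""
    (zarr_urls.foldl
      (fun (d : PySem.Dict String (List String)) u =>
        let well := pvWellOf shared_root_dir shared_plate u
        if d.contains well then d.modify well [] (· ++ [u]) else d.insert well [u])
      PySem.Dict.empty).items
  | _, _ => []

-- ===== PORT B =====
-- root_plate(zarr_url): the pair ("/".join(parts[:-1]), parts[-1] + ".zarr")
def pvBRootPlate (u : String) : String × String :=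
  let tmp := (((PySem.Chars.split? u.toList ".zarr/".toList).getD []).headD [])
  let parts := PySem.Chars.splitOn tmp ['/']
  (String.ofList (PySem.Chars.join ['/'] (PySem.List.slice parts none (some (-1)))),
   String.ofList (((PySem.List.pyGet? parts (-1)).getD []) ++ ".zarr".toList))

-- well_of(zarr_url), same string logic as A's (the task fixes it); .lstrip("/") ported
-- by hand as dropWhile (· == '/'), exact for this one-character strip set.
def pvBWellOf (root plate u : String) : String :=
  let pre := root.toList ++ '/' :: plate.toList
  let rel := (PySem.Chars.replace u.toList pre []).dropWhile (· == '/')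
  let parts := PySem.Chars.splitOn rel ['/']
  String.ofList (PySem.Chars.join ['/'] (PySem.List.slice parts (some 0) (some 2)))

-- validation by comparison with the first url's pair; none = the Python raises
-- (IndexError on [], ValueError when some pair differs from the first)
def pvBCommon (zarr_urls : List String) : Option (String × String) :=
  match zarr_urls with
  | [] => none
  | u0 :: rest =>
    let p0 := pvBRootPlate u0
    if rest.any (fun u => pvBRootPlate u ≠ p0) then none else some p0

def group_zarr_urls_by_well_py_alt (zarr_urls : List String) : List (String × List String) :=
  match pvBCommon zarr_urls with
  | none => []
  | some (root0, plate0) =>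
    let wells_order := zarr_urls.foldl
      (fun (acc : List String) u =>
        let w := pvBWellOf root0 plate0 u
        if w ∈ acc then acc else acc ++ [w])
      []
    wells_order.map
      (fun w => (w, zarr_urls.filter (fun u => pvBWellOf root0 plate0 u == w)))

-- ===== PRECONDITION & SPEC =====
-- Pre_ excludes exactly the inputs on which A raises: the empty list (IndexError) and
-- lists whose urls do not all share one plate and one root dir (ValueError).
def Pre_group_zarr_urls_by_well_py (zarr_urls : List String) : Prop :=
  zarr_urls ≠ [] ∧ ∀ u ∈ zarr_urls,
    pvPlateOf u = pvPlateOf (zarr_urls.headD "") ∧ pvRootOf u = pvRootOf (zarr_urls.headD "")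
instance (zarr_urls : List String) : Decidable (Pre_group_zarr_urls_by_well_py zarr_urls) := by
  unfold Pre_group_zarr_urls_by_well_py; infer_instance

def pvWitness_group_zarr_urls_by_well_py : List String :=
  ["/tmp/plate.zarr/A/01/0", "/tmp/plate.zarr/A/01/1", "/tmp/plate.zarr/B/02/0"]

def Spec_group_zarr_urls_by_well_py (zarr_urls : List String) (out : List (String × List String)) : Prop := out = group_zarr_urls_by_well_py_alt zarr_urls
instance (zarr_urls : List String) (out : List (String × List String)) : Decidable (Spec_group_zarr_urls_by_well_py zarr_urls out) := by unfold Spec_group_zarr_urls_by_well_py; infer_instance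

-- ===== CLAIM (what is proved, stated in full; the proofs are below) =====
def Claim_equal_group_zarr_urls_by_well_py : Prop := ∀ (zarr_urls : List String), Dom_group_zarr_urls_by_well_py zarr_urls → Pre_group_zarr_urls_by_well_py zarr_urls → Spec_group_zarr_urls_by_well_py zarr_urls (group_zarr_urls_by_well_py zarr_urls)

-- ===== LEMMAS AND PROOFS =====

-- B's per-url pair is A's (root, plate) pair
theorem pvBRootPlate_eq (u : String) : pvBRootPlate u = (pvRootOf u, pvPlateOf u) := rfl

-- B's well function is A's
theorem pvBWellOf_eq (root plate u : String) : pvBWellOf root plate u = pvWellOf root plate u := rfl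

-- A's dict step is a plain 'modify' in both branches
theorem pvStep_eq_modify (d : PySem.Dict String (List String)) (w : String) (u : String) :
    (if d.contains w then d.modify w [] (· ++ [u]) else d.insert w [u])
      = d.modify w [] (· ++ [u]) := by
  by_cases h : d.contains w
  · simp [h]
  · have hg : d.get? w = none := by
      have hc := PySem.Dict.contains_eq_isSome_get? d w
      rw [Bool.eq_false_iff.mpr h] at hc
      exact Option.not_isSome_iff_eq_none.mp (by simp [← hc])
    simp [h, PySem.Dict.modify, PySem.Dict.getD, hg]

-- the grouping equivalence, parametric in the well function: A's fold-into-dict items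
-- equal B's first-seen well order mapped over per-well filters
theorem pvGroup_eq (f : String → String) (l : List String) :
    (l.foldl (fun (d : PySem.Dict String (List String)) u =>
        if d.contains (f u) then d.modify (f u) [] (· ++ [u]) else d.insert (f u) [u])
      PySem.Dict.empty).items
    = (l.foldl (fun (acc : List String) u =>
        if f u ∈ acc then acc else acc ++ [f u]) []).map
        (fun w => (w, l.filter (fun u => f u == w))) := by
  have hstep : (l.foldl (fun (d : PySem.Dict String (List String)) u =>
        if d.contains (f u) then d.modify (f u) [] (· ++ [u]) else d.insert (f u) [u])
      PySem.Dict.empty)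
      = l.foldl (fun d u => d.modify (f u) [] (· ++ [u])) PySem.Dict.empty := by
    apply List.foldl_ext
    intro d u _
    exact pvStep_eq_modify d (f u) u
  rw [hstep]
  have hkeys : (l.foldl (fun (d : PySem.Dict String (List String)) u =>
        d.modify (f u) [] (· ++ [u])) PySem.Dict.empty).keys
      = PySem.Set.ofList (l.map f) := by
    have := PySem.Dict.keys_foldl_modify_key l f ([] : List String)
      (fun _ u => (· ++ [u])) PySem.Dict.empty
    simpa [PySem.Set.update, PySem.Set.ofList_eq_foldl] using this
  have hnodup : (l.foldl (fun (d : PySem.Dict String (List String)) u =>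
        d.modify (f u) [] (· ++ [u])) PySem.Dict.empty).keys.Nodup := by
    exact PySem.Dict.nodup_keys_foldl_modify_key l f ([] : List String)
      (fun _ u => (· ++ [u])) PySem.Dict.empty (by simp [PySem.Dict.keys, PySem.Dict.empty])
  have hwells : (l.foldl (fun (acc : List String) u =>
        if f u ∈ acc then acc else acc ++ [f u]) [])
      = PySem.Set.ofList (l.map f) := by
    have h1 : (l.foldl (fun (acc : List String) u =>
          if f u ∈ acc then acc else acc ++ [f u]) [])
        = l.foldl (fun (s : PySem.Set String) u => s.add (f u)) [] := by
      apply List.foldl_ext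
      intro s u _
      by_cases hm : f u ∈ s <;> simp [PySem.Set.add, PySem.Set.contains, hm]
    rw [h1, ← PySem.Set.update_map_eq_foldl_add]
    simp [PySem.Set.update, PySem.Set.ofList_eq_foldl]
  rw [PySem.Dict.items_eq_map_keys _ hnodup ([] : List String), hkeys, hwells]
  apply List.map_congr_left
  intro w _
  refine congrArg (fun v => (w, v)) ?_
  have hfold : (l.foldl (fun (d : PySem.Dict String (List String)) u =>
        d.modify (f u) [] (· ++ [u])) PySem.Dict.empty)
      = ((l.map (fun u => (f u, u))).foldl
          (fun d p => d.modify p.1 [] (· ++ [p.2])) PySem.Dict.empty) := by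
    rw [List.foldl_map]
  rw [hfold, PySem.Dict.getD_foldl_modify_append]
  simp [List.filter_map, Function.comp_def]

-- helper: the plate/root-collecting loop is a pair of maps
theorem pvFoldPair (xs : List String) : ∀ (init : List String × List String),
    xs.foldl (fun acc u => (acc.1 ++ [pvPlateOf u], acc.2 ++ [pvRootOf u])) init
      = (init.1 ++ xs.map pvPlateOf, init.2 ++ xs.map pvRootOf) := by
  induction xs with
  | nil => simp
  | cons x t ih => intro init; simp [ih]

-- helper: adding copies of s to {s} changes nothing
theorem pvAddConst (xs : List String) (s : String) (h : ∀ x ∈ xs, x = s) :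
    xs.foldl PySem.Set.add [s] = [s] := by
  induction xs with
  | nil => rfl
  | cons x t ih =>
    have hx : x = s := h x (by simp)
    have hs : PySem.Set.add [s] s = [s] := by
      simp [PySem.Set.add, PySem.Set.contains]
    simp only [List.foldl_cons, hx, hs]
    exact ih (fun y hy => h y (by simp [hy]))

-- helper: set() of a nonempty constant list is the singleton
theorem pvOfListConst (xs : List String) (s : String) (h : ∀ x ∈ xs, x = s) (hne : xs ≠ []) :
    PySem.Set.ofList xs = [s] := by
  cases xs with
  | nil => exact absurd rfl hne
  | cons a t =>
    have ha : a = s := h a (by simp)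
    have h0 : PySem.Set.add ([] : PySem.Set String) s = [s] := by
      simp [PySem.Set.add, PySem.Set.contains]
    rw [PySem.Set.ofList_eq_foldl]
    simp only [List.foldl_cons, ha]
    rw [h0]
    exact pvAddConst t s (fun y hy => h y (by simp [hy]))

-- under Pre_, A's extraction succeeds with the head's plate and root
theorem pvExtract_some (l : List String) (h : Pre_group_zarr_urls_by_well_py l) :
    pvExtractCommonRoot l
      = some (((PySem.Dict.empty).insert "shared_root_dir" (pvRootOf (l.headD ""))).insert
          "shared_plate" (pvPlateOf (l.headD ""))) := by
  obtain ⟨hne, hall⟩ := h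
  obtain ⟨a, t, rfl⟩ : ∃ a t, l = a :: t := by
    cases l with
    | nil => exact absurd rfl hne
    | cons a t => exact ⟨a, t, rfl⟩
  unfold pvExtractCommonRoot
  rw [pvFoldPair]
  have hplate : (a :: t).map pvPlateOf = pvPlateOf a :: t.map (fun _ => pvPlateOf a) := by
    simp only [List.map_cons]
    refine congrArg _ (List.map_congr_left ?_)
    intro u hu
    simpa using (hall u (by simp [hu])).1
  have hroot : (a :: t).map pvRootOf = pvRootOf a :: t.map (fun _ => pvRootOf a) := by
    simp only [List.map_cons]
    refine congrArg _ (List.map_congr_left ?_)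
    intro u hu
    simpa using (hall u (by simp [hu])).2
  simp only [List.nil_append, hplate, hroot]
  have hconst : ∀ (s x : String), x ∈ s :: t.map (fun _ => s) → x = s := by
    intro s x hx
    rcases List.mem_cons.mp hx with h1 | h1
    · exact h1
    · obtain ⟨y, _, h2⟩ := List.mem_map.mp h1
      exact h2.symm
  rw [pvOfListConst _ _ (hconst (pvPlateOf a)) (by simp),
      pvOfListConst _ _ (hconst (pvRootOf a)) (by simp)]
  simp [PySem.Set.len, PySem.List.pyGet?, PySem.List.pyIdx?]

-- under Pre_, B's compare-to-first validation succeeds with the same pair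
theorem pvBCommon_some (l : List String) (h : Pre_group_zarr_urls_by_well_py l) :
    pvBCommon l = some (pvRootOf (l.headD ""), pvPlateOf (l.headD "")) := by
  obtain ⟨hne, hall⟩ := h
  obtain ⟨a, t, rfl⟩ : ∃ a t, l = a :: t := by
    cases l with
    | nil => exact absurd rfl hne
    | cons a t => exact ⟨a, t, rfl⟩
  unfold pvBCommon
  have hany : t.any (fun u => decide (pvBRootPlate u ≠ pvBRootPlate a)) = false := by
    rw [List.any_eq_false]
    intro u hu
    have h1 := hall u (by simp [hu])
    simp only [List.headD_cons] at h1
    simp [pvBRootPlate_eq, h1.1, h1.2]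
  simp only [pvBRootPlate_eq] at hany
  simp only [List.headD_cons, pvBRootPlate_eq, hany, Bool.false_eq_true, if_false]

-- ===== VERDICT (by name: the statement is the Claim_ definition above) =====
theorem group_zarr_urls_by_well_py_spec : Claim_equal_group_zarr_urls_by_well_py := by
  intro l hdom hpre
  unfold Spec_group_zarr_urls_by_well_py
  unfold group_zarr_urls_by_well_py group_zarr_urls_by_well_py_alt
  rw [pvExtract_some l hpre, pvBCommon_some l hpre]
  dsimp only
  simp only [pvBWellOf_eq, PySem.Dict.get?_insert_self,
    PySem.Dict.get?_insert_of_ne _ _ (by decide : ("shared_root_dir" : String) ≠ "shared_plate"),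
    Option.getD_some]
  exact pvGroup_eq (pvWellOf (pvRootOf (l.headD "")) (pvPlateOf (l.headD ""))) l
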